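-- pv_equiv track=rewrite | github.com/Gyaak/problem-solving | 프로그래머스/2/389480. 완전범죄/완전범죄.py | solution
-- ===== SOURCE A (Python) =====
-- def solution(info, n, m):
--     num = len(info)
--     dp = [
--         [
--             [False for _ in range(m)]
--             for _ in range(n)
--         ]
--         for _ in range(num)
--     ]
--
--     if info[0][0] < n:
--         dp[0][info[0][0]][0] = True
--     if info[0][1] < m:
--         dp[0][0][info[0][1]] = True
--
--     for i in range(1,num):
--         for j in range(n):
--             for k in range(m):
--                 n_val = False
--                 m_val = False
--                 if j >= info[i][0]:
--                     n_val = dp[i-1][j-info[i][0]][k]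
--                 if k >= info[i][1]:
--                     m_val = dp[i-1][j][k-info[i][1]]
--                 dp[i][j][k] = n_val or m_val
--     answer = -1
--     for i in range(n):
--         for j in range(m):
--             if dp[num-1][i][j]:
--                 return i
--     return answer
-- ===== SOURCE B (Python) =====
-- def solution(info, n, m):
--     # 1D DP over B-budget: f[k] = minimal A-trace sum with B-trace sum exactly k,
--     # capped at sentinel n (sums >= n can never be an answer).
--     INF = n
--     f = [INF] * max(m, 0)
--     a0, b0 = info[0][0], info[0][1]
--     if a0 < n:
--         f[0] = a0
--     if b0 < m:
--         f[b0] = min(f[b0], 0)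
--     for row in info[1:]:
--         a, b = row[0], row[1]
--         f = [min(f[k] + a if f[k] + a < n else INF,
--                  f[k - b] if b <= k else INF)
--              for k in range(m)]
--     best = min(f, default=INF)
--     return best if best < n else -1
-- ===== Notes on version B (the rewrite author's own statement) =====
-- stated objective: faster
-- what changed: A fills a num*n*m boolean reachability table and scans it; B keeps only a length-m array of the minimal A-trace sum per exact B-trace sum (capped at n), updates it once per item, and returns its minimum, dropping the whole n dimension.
-- outside the precondition, e.g. on solution([[-1, 0]], 2, 1): A returns 0, B returns -1; on solution([[0, 5], [-3, 5]], -1, 2): A returns -1, B returns -4; on solution([[1, 2], [5]], 0, 0): A returns -1, B raises IndexError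
import Mathlib
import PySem

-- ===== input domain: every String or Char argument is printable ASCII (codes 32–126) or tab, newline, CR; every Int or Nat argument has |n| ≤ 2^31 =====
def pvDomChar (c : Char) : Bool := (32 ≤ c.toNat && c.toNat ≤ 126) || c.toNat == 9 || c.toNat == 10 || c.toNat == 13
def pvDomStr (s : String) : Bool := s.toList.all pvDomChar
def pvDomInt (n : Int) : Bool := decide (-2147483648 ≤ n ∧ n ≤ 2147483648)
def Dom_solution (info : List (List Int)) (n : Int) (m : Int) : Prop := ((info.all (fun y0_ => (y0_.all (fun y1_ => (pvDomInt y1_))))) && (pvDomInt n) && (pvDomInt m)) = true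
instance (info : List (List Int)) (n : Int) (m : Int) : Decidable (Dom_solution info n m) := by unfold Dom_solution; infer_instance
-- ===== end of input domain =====

-- B replaces A's num×n×m boolean reachability table by a length-m array of minimal
-- A-sums per B-budget (one 1D DP pass), dropping the factor-n dimension.

-- ===== PORT A =====
-- Python list indexing; exact for the nonnegative in-range indices Pre_ admits
def pvGetI (xs : List Int) (i : Nat) : Int := xs.getD i 0
def pvCell (g : List (List Bool)) (j k : Nat) : Bool := (g.getD j []).getD k false
-- dp[j][k] = True  (in-range write, as Pre_ guarantees)
def pvSet2 (g : List (List Bool)) (j k : Nat) : List (List Bool) :=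
  g.set j ((g.getD j []).set k true)

-- body of `for i in range(1,num)`: computes row i of dp from row i-1 (same cells, same values)
def solutionStep (n m : Int) (prev : List (List Bool)) (r : List Int) : List (List Bool) :=
  let a := pvGetI r 0
  let b := pvGetI r 1
  (List.range n.toNat).map (fun (j : Nat) =>
    (List.range m.toNat).map (fun (k : Nat) =>
      (if a ≤ (j : Int) then pvCell prev ((j : Int) - a).toNat k else false) ||
      (if b ≤ (k : Int) then pvCell prev j ((k : Int) - b).toNat else false)))

def solution (info : List (List Int)) (n : Int) (m : Int) : Int :=
  let first := info.getD 0 []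
  let a0 := pvGetI first 0
  let b0 := pvGetI first 1
  let row0 : List (List Bool) :=
    (List.range n.toNat).map (fun _ => (List.range m.toNat).map (fun _ => false))
  let r1 := if a0 < n then pvSet2 row0 a0.toNat 0 else row0
  let r2 := if b0 < m then pvSet2 r1 0 b0.toNat else r1
  let fin := (info.drop 1).foldl (solutionStep n m) r2
  -- final scan: first i in range(n) with some dp[num-1][i][j] true, else -1
  match (List.range n.toNat).find? (fun j =>
      (List.range m.toNat).any (fun k => pvCell fin j k)) with
  | some j => (j : Int)
  | none => -1

-- ===== PORT B =====
def solution_alt (info : List (List Int)) (n : Int) (m : Int) : Int :=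
  let INF := n
  let first := info.getD 0 []
  let a0 := first.getD 0 0
  let b0 := first.getD 1 0
  let f0 : List Int := List.replicate m.toNat INF
  let f1 := if a0 < n then f0.set 0 a0 else f0
  let f2 := if b0 < m then f1.set b0.toNat (min (f1.getD b0.toNat 0) 0) else f1
  let ff := (info.drop 1).foldl (fun f r =>
    let a := r.getD 0 0
    let b := r.getD 1 0
    (List.range m.toNat).map (fun k =>
      min (if f.getD k 0 + a < n then f.getD k 0 + a else INF)
          (if b ≤ (k : Int) then f.getD ((k : Int) - b).toNat 0 else INF))) f2
  -- min(ff, default=INF): every entry is ≤ INF by construction, so folding from INF is exact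
  let best := ff.foldl min INF
  if best < n then best else -1

-- ===== PRECONDITION & SPEC =====
-- Pre_ excludes inputs on which A raises IndexError (empty info, a first row shorter
-- than 2, a first-row guard writing into an empty n×m grid) and rows with negative
-- trace counts, on which A either raises via out-of-range DP indexing or returns a
-- value shaped by Python's negative-index wraparound / an empty grid (accidental).
def Pre_solution (info : List (List Int)) (n : Int) (m : Int) : Prop :=
  (info ≠ [] ∧
   (∀ r ∈ info, 2 ≤ r.length ∧ 0 ≤ r.getD 0 0 ∧ 0 ≤ r.getD 1 0) ∧
   ((info.getD 0 []).getD 0 0 < n → 1 ≤ m) ∧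
   ((info.getD 0 []).getD 1 0 < m → 1 ≤ n)) ∨
  (info ≠ [] ∧ (∀ r ∈ info, 2 ≤ r.length) ∧ m ≤ 0 ∧
   n ≤ (info.getD 0 []).getD 0 0 ∧ m ≤ (info.getD 0 []).getD 1 0)
instance (info : List (List Int)) (n : Int) (m : Int) : Decidable (Pre_solution info n m) := by
  unfold Pre_solution; infer_instance

def pvWitness_solution : List (List Int) × Int × Int := ([[1, 2], [3, 1]], 4, 3)

def Spec_solution (info : List (List Int)) (n : Int) (m : Int) (out : Int) : Prop := out = solution_alt info n m
instance (info : List (List Int)) (n : Int) (m : Int) (out : Int) : Decidable (Spec_solution info n m out) := by unfold Spec_solution; infer_instance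

-- ===== CLAIM (what is proved, stated in full; the proofs are below) =====
def Claim_equal_solution : Prop := ∀ (info : List (List Int)) (n : Int) (m : Int), Dom_solution info n m → Pre_solution info n m → Spec_solution info n m (solution info n m)

-- ===== LEMMAS AND PROOFS =====

-- first index j < N with p j, else N
def pvFf (N : Nat) (p : Nat → Bool) : Nat := ((List.range N).find? p).getD N
-- embed a Nat scan result (sentinel N = n.toNat) into Int (sentinel n)
def pvSent (n : Int) (x : Nat) : Int := if x < n.toNat then (x : Int) else n
-- minimal A-sum reachable in column k of grid g (sentinel n)
def pvColMin (g : List (List Bool)) (N : Nat) (n : Int) (k : Nat) : Int :=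
  pvSent n (pvFf N (fun j => pvCell g j k))

theorem pvFf_le (N : Nat) (p : Nat → Bool) : pvFf N p ≤ N := by
  unfold pvFf
  cases h : (List.range N).find? p with
  | none => simp
  | some j =>
    have := List.mem_range.mp (List.mem_of_find?_eq_some h)
    simp; omega

theorem pvFf_spec (N : Nat) (p : Nat → Bool) (h : pvFf N p < N) : p (pvFf N p) = true := by
  unfold pvFf at *
  cases hf : (List.range N).find? p with
  | none => rw [hf] at h; simp at h
  | some j => simpa using List.find?_some hf

theorem pvFf_min (N : Nat) (p : Nat → Bool) (i : Nat) (h : i < pvFf N p) : p i = false := by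
  induction N with
  | zero => simp [pvFf] at h
  | succ N ih =>
    unfold pvFf at h
    rw [List.range_succ, List.find?_append] at h
    cases hf : (List.range N).find? p with
    | some j =>
      rw [hf] at h; simp at h
      exact ih (by unfold pvFf; rw [hf]; simpa using h)
    | none =>
      rw [hf] at h; simp at h
      have h1 := List.find?_eq_none.mp hf
      simp at h1
      by_cases hpN : p N = true
      · simp [hpN] at h
        exact Bool.eq_false_iff.mpr (fun hc => by simp [h1 i (by omega)] at hc)
      · by_cases hiN : i < N
        · exact Bool.eq_false_iff.mpr (fun hc => by simp [h1 i hiN] at hc)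
        · by_cases hi : i = N
          · subst hi; exact Bool.eq_false_iff.mpr hpN
          · simp [hpN] at h; omega

theorem pvFf_eq (N : Nat) (p : Nat → Bool) (F : Nat) (h1 : F ≤ N) (h2 : F < N → p F = true)
    (h3 : ∀ i < F, p i = false) : pvFf N p = F := by
  rcases Nat.lt_trichotomy (pvFf N p) F with h | h | h
  · have := h3 _ h
    have h4 := pvFf_spec N p (by omega)
    simp [this] at h4
  · exact h
  · have hFN : F < N := by have := pvFf_le N p; omega
    have := pvFf_min N p F h
    simp [h2 hFN] at this

theorem pvFf_congr (N : Nat) (p q : Nat → Bool) (h : ∀ j < N, p j = q j) : pvFf N p = pvFf N q := by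
  refine pvFf_eq N p (pvFf N q) (pvFf_le N q) (fun hlt => ?_) (fun i hi => ?_)
  · rw [h _ hlt]; exact pvFf_spec N q hlt
  · have hi2 : i < N := by have := pvFf_le N q; omega
    rw [h _ hi2]; exact pvFf_min N q i hi

theorem pvFf_or (N : Nat) (p q : Nat → Bool) :
    pvFf N (fun j => p j || q j) = min (pvFf N p) (pvFf N q) := by
  have hp := pvFf_le N p; have hq := pvFf_le N q
  refine pvFf_eq N _ _ (by omega) (fun hlt => ?_) (fun i hi => ?_)
  · rcases Nat.le_total (pvFf N p) (pvFf N q) with h | h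
    · have : min (pvFf N p) (pvFf N q) = pvFf N p := by omega
      rw [this] at hlt ⊢; simp [pvFf_spec N p hlt]
    · have : min (pvFf N p) (pvFf N q) = pvFf N q := by omega
      rw [this] at hlt ⊢; simp [pvFf_spec N q hlt]
  · simp [pvFf_min N p i (by omega), pvFf_min N q i (by omega)]

theorem pvFf_false (N : Nat) : pvFf N (fun _ => false) = N :=
  pvFf_eq N _ N (le_refl N) (by simp) (by simp)

theorem pvFf_shift (N a : Nat) (p : Nat → Bool) :
    pvFf N (fun j => if a ≤ j then p (j - a) else false) =
      if a + pvFf N p < N then a + pvFf N p else N := by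
  have hp := pvFf_le N p
  split
  · refine pvFf_eq N _ _ (by omega) (fun hlt => ?_) (fun i hi => ?_)
    · simp only [Nat.le_add_right, if_pos, Nat.add_sub_cancel_left]
      exact pvFf_spec N p (by omega)
    · by_cases hai : a ≤ i
      · simp [hai, pvFf_min N p (i - a) (by omega)]
      · simp [hai]
  · refine pvFf_eq N _ N (le_refl N) (by omega) (fun i hi => ?_)
    · by_cases hai : a ≤ i
      · simp [hai, pvFf_min N p (i - a) (by omega)]
      · simp [hai]

theorem pvSent_min (n : Int) (x y : Nat) (hx : x ≤ n.toNat) (hy : y ≤ n.toNat) :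
    pvSent n (min x y) = min (pvSent n x) (pvSent n y) := by
  unfold pvSent; split_ifs <;> omega
theorem pvSent_shift (n : Int) (aI : Int) (ha : 0 ≤ aI) (F : Nat) (hF : F ≤ n.toNat) :
    pvSent n (if aI.toNat + F < n.toNat then aI.toNat + F else n.toNat) =
      (if pvSent n F + aI < n then pvSent n F + aI else n) := by
  unfold pvSent; split_ifs <;> omega

theorem getD_map_range {α : Type} (M k : Nat) (f : Nat → α) (d : α) :
    (((List.range M).map f).getD k d) = if k < M then f k else d := by
  rcases Nat.lt_or_ge k M with h | h
  · rw [List.getD_eq_getElem _ _ (by simpa using h)]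
    simp [h]
  · rw [List.getD_eq_default _ _ (by simpa using h)]
    simp [Nat.not_lt.mpr h]

theorem pvCell_step (n m : Int) (prev : List (List Bool)) (r : List Int) (j k : Nat)
    (hj : j < n.toNat) (hk : k < m.toNat) :
    pvCell (solutionStep n m prev r) j k =
      ((if pvGetI r 0 ≤ (j : Int) then pvCell prev ((j : Int) - pvGetI r 0).toNat k else false) ||
       (if pvGetI r 1 ≤ (k : Int) then pvCell prev j ((k : Int) - pvGetI r 1).toNat else false)) := by
  unfold solutionStep pvCell
  simp only [getD_map_range, hj, hk, if_true]

theorem pvColMin_step (n m : Int) (prev : List (List Bool)) (r : List Int)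
    (ha : 0 ≤ pvGetI r 0) (_hb : 0 ≤ pvGetI r 1) (k : Nat) (hk : k < m.toNat) :

    pvColMin (solutionStep n m prev r) n.toNat n k =
      min (if pvColMin prev n.toNat n k + pvGetI r 0 < n then pvColMin prev n.toNat n k + pvGetI r 0 else n)
          (if pvGetI r 1 ≤ (k : Int) then pvColMin prev n.toNat n ((k : Int) - pvGetI r 1).toNat else n) := by
  have hF0 := pvFf_le n.toNat (fun j => pvCell prev j k)
  unfold pvColMin
  rw [pvFf_congr n.toNat _
      (fun j => (if (pvGetI r 0).toNat ≤ j then pvCell prev (j - (pvGetI r 0).toNat) k else false) ||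
                (if pvGetI r 1 ≤ (k : Int) then pvCell prev j ((k : Int) - pvGetI r 1).toNat else false))
      (fun j hj => by
        rw [pvCell_step n m prev r j k hj hk]
        congr 1
        by_cases hc : pvGetI r 0 ≤ (j : Int)
        · rw [if_pos hc, if_pos (by omega)]
          congr 1; omega
        · rw [if_neg hc, if_neg (by omega)])]
  by_cases hbk : pvGetI r 1 ≤ (k : Int)
  · have h2 : (fun j => (if (pvGetI r 0).toNat ≤ j then pvCell prev (j - (pvGetI r 0).toNat) k else false) ||
                (if pvGetI r 1 ≤ (k : Int) then pvCell prev j ((k : Int) - pvGetI r 1).toNat else false)) =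
        (fun j => (if (pvGetI r 0).toNat ≤ j then pvCell prev (j - (pvGetI r 0).toNat) k else false) ||
                (fun j => pvCell prev j ((k : Int) - pvGetI r 1).toNat) j) := by
      funext j; rw [if_pos hbk]
    have hs := pvFf_shift n.toNat (pvGetI r 0).toNat (fun i => pvCell prev i k)
    simp only [] at hs
    rw [h2, pvFf_or, hs,
        pvSent_min n _ _ (by split <;> omega) (pvFf_le _ _),
        pvSent_shift n (pvGetI r 0) ha _ hF0, if_pos hbk]
  · have h2 : (fun j => (if (pvGetI r 0).toNat ≤ j then pvCell prev (j - (pvGetI r 0).toNat) k else false) ||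
                (if pvGetI r 1 ≤ (k : Int) then pvCell prev j ((k : Int) - pvGetI r 1).toNat else false)) =
        (fun j => (if (pvGetI r 0).toNat ≤ j then (fun i => pvCell prev i k) (j - (pvGetI r 0).toNat) else false)) := by
      funext j; rw [if_neg hbk, Bool.or_false]
    have hs := pvFf_shift n.toNat (pvGetI r 0).toNat (fun i => pvCell prev i k)
    simp only [] at hs
    rw [h2, hs, pvSent_shift n (pvGetI r 0) ha _ hF0, if_neg hbk]
    split <;> omega

theorem pvFold_inv (n m : Int) (rs : List (List Int))
    (hrs : ∀ r ∈ rs, 0 ≤ r.getD 0 0 ∧ 0 ≤ r.getD 1 0) (g : List (List Bool)) :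
    rs.foldl (fun f r =>
      (List.range m.toNat).map (fun k =>
        min (if f.getD k 0 + r.getD 0 0 < n then f.getD k 0 + r.getD 0 0 else n)
            (if r.getD 1 0 ≤ (k : Int) then f.getD ((k : Int) - r.getD 1 0).toNat 0 else n)))
      ((List.range m.toNat).map (pvColMin g n.toNat n)) =
    (List.range m.toNat).map (pvColMin (rs.foldl (solutionStep n m) g) n.toNat n) := by
  induction rs generalizing g with
  | nil => simp
  | cons r rest ih =>
    obtain ⟨ha, hb⟩ := hrs r List.mem_cons_self
    simp only [List.foldl_cons]
    have hone : (List.range m.toNat).map (fun k =>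
          min (if ((List.range m.toNat).map (pvColMin g n.toNat n)).getD k 0 + r.getD 0 0 < n
               then ((List.range m.toNat).map (pvColMin g n.toNat n)).getD k 0 + r.getD 0 0 else n)
              (if r.getD 1 0 ≤ (k : Int)
               then ((List.range m.toNat).map (pvColMin g n.toNat n)).getD ((k : Int) - r.getD 1 0).toNat 0 else n)) =
        (List.range m.toNat).map (pvColMin (solutionStep n m g r) n.toNat n) := by
      apply List.map_congr_left
      intro k hkm
      have hk : k < m.toNat := List.mem_range.mp hkm
      have hstep := pvColMin_step n m g r ha hb k hk
      simp only [pvGetI] at hstep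
      rw [getD_map_range, if_pos hk]
      by_cases hbk : r.getD 1 0 ≤ (k : Int)
      · rw [getD_map_range, if_pos (by omega : ((k : Int) - r.getD 1 0).toNat < m.toNat)]
        exact hstep.symm
      · rw [if_neg hbk]
        rw [if_neg hbk] at hstep
        exact hstep.symm
    rw [hone]
    exact ih (fun r' h' => hrs r' (List.mem_cons_of_mem _ h')) (solutionStep n m g r)

theorem pvFinal (n : Int) (fin : List (List Bool)) (M : Nat) :
    ((List.range M).map (pvColMin fin n.toNat n)).foldl min n =
      pvSent n (pvFf n.toNat (fun j => (List.range M).any (fun k => pvCell fin j k))) := by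
  induction M with
  | zero =>
    simp only [List.range_zero, List.map_nil, List.foldl_nil, List.any_nil]
    rw [pvFf_congr n.toNat _ (fun _ => false) (by simp), pvFf_false]
    simp [pvSent]
  | succ M ih =>
    rw [List.range_succ, List.map_append, List.foldl_append]
    simp only [List.map_cons, List.map_nil, List.foldl_cons, List.foldl_nil]
    rw [ih]
    rw [pvFf_congr n.toNat (fun j => (List.range M ++ [M]).any (fun k => pvCell fin j k))
        (fun j => ((List.range M).any (fun k => pvCell fin j k)) || (fun j => pvCell fin j M) j)
        (fun j _ => by simp [List.any_append])]
    rw [pvFf_or, pvSent_min n _ _ (pvFf_le _ _) (pvFf_le _ _)]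
    rfl

theorem pvCell_set2 (g : List (List Bool)) (j0 k0 j k : Nat) :
    pvCell (pvSet2 g j0 k0) j k =
      if j = j0 ∧ k = k0 ∧ j0 < g.length ∧ k0 < (g.getD j0 []).length then true
      else pvCell g j k := by
  unfold pvCell pvSet2
  simp only [List.getD_eq_getElem?_getD, List.getElem?_set]
  split_ifs <;>
    simp_all [List.getElem?_set] <;>
    (try (split_ifs <;> simp_all)) <;>
    (try omega) <;>
    (try (rename_i hc hlen; rw [List.getElem?_eq_getElem hc.2.2.1] at hc; simp at hc; omega))

theorem pvSet2_getD_len (g : List (List Bool)) (j0 k0 j : Nat) :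
    ((pvSet2 g j0 k0).getD j []).length = (g.getD j []).length := by
  by_cases h : j < g.length
  · by_cases hj : j0 = j
    · subst hj
      simp [pvSet2, List.getD_eq_getElem?_getD, h]
    · simp [pvSet2, List.getD_eq_getElem?_getD, hj]
  · have hlen : (pvSet2 g j0 k0).length = g.length := by simp [pvSet2]
    rw [List.getD_eq_default _ _ (by rw [hlen]; omega), List.getD_eq_default _ _ (by omega)]

theorem pvBase (n m a0 b0 : Int) (ha0 : 0 ≤ a0) (hb0 : 0 ≤ b0)
    (hg1 : a0 < n → 1 ≤ m) (hg2 : b0 < m → 1 ≤ n) :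
    (if b0 < m then
       (if a0 < n then (List.replicate m.toNat n).set 0 a0 else List.replicate m.toNat n).set b0.toNat
         (min ((if a0 < n then (List.replicate m.toNat n).set 0 a0 else List.replicate m.toNat n).getD b0.toNat 0) 0)
     else if a0 < n then (List.replicate m.toNat n).set 0 a0 else List.replicate m.toNat n) =
    (List.range m.toNat).map (pvColMin
      (if b0 < m then
         pvSet2 (if a0 < n then pvSet2 ((List.range n.toNat).map (fun _ => (List.range m.toNat).map (fun _ => false))) a0.toNat 0
                 else (List.range n.toNat).map (fun _ => (List.range m.toNat).map (fun _ => false))) 0 b0.toNat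
       else if a0 < n then pvSet2 ((List.range n.toNat).map (fun _ => (List.range m.toNat).map (fun _ => false))) a0.toNat 0
            else (List.range n.toNat).map (fun _ => (List.range m.toNat).map (fun _ => false))) n.toNat n) := by
  set N := n.toNat with hN
  set M := m.toNat with hM
  set row0 : List (List Bool) := (List.range N).map (fun _ => (List.range M).map (fun _ => false)) with hrow0
  have hc0 : ∀ j k : Nat, pvCell row0 j k = false := by
    intro j k; rw [hrow0]; unfold pvCell
    rcases Nat.lt_or_ge j N with h | h
    · rw [getD_map_range, if_pos h, getD_map_range]; split <;> rfl
    · rw [getD_map_range, if_neg (by omega)]; rfl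
  have hlen0 : row0.length = N := by rw [hrow0]; simp
  have hrowlen0 : ∀ j, j < N → (row0.getD j []).length = M := by
    intro j hj; rw [hrow0, getD_map_range, if_pos hj]; simp
  set r1 := if a0 < n then pvSet2 row0 a0.toNat 0 else row0 with hr1
  set r2 := if b0 < m then pvSet2 r1 0 b0.toNat else r1 with hr2
  have hlen1 : r1.length = N := by rw [hr1]; split <;> simp [pvSet2, hlen0]
  have hrowlen1 : ∀ j, j < N → (r1.getD j []).length = M := by
    intro j hj; rw [hr1]; split
    · rw [pvSet2_getD_len]; exact hrowlen0 j hj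
    · exact hrowlen0 j hj
  have hcell1 : ∀ j k : Nat, pvCell r1 j k =
      if a0 < n ∧ j = a0.toNat ∧ k = 0 then true else false := by
    intro j k
    rw [hr1]
    by_cases ha : a0 < n
    · rw [if_pos ha, pvCell_set2]
      have haN : a0.toNat < N := by omega
      have hM1 : 0 < M := by have := hg1 ha; omega
      by_cases hx : j = a0.toNat ∧ k = 0
      · rw [if_pos ⟨hx.1, hx.2, by omega, by rw [hrowlen0 _ haN]; omega⟩, if_pos ⟨ha, hx⟩]
      · rw [if_neg (fun h => hx ⟨h.1, h.2.1⟩), if_neg (fun h => hx h.2), hc0]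
    · rw [if_neg ha, if_neg (fun h => ha h.1), hc0]
  have hcell : ∀ j k : Nat, pvCell r2 j k =
      if (b0 < m ∧ j = 0 ∧ k = b0.toNat) ∨ (a0 < n ∧ j = a0.toNat ∧ k = 0) then true else false := by
    intro j k
    rw [hr2]
    by_cases hb : b0 < m
    · rw [if_pos hb, pvCell_set2]
      have hN1 : 0 < N := by have := hg2 hb; omega
      have hbM : b0.toNat < M := by omega
      by_cases hx : j = 0 ∧ k = b0.toNat
      · rw [if_pos ⟨hx.1, hx.2, by omega, by rw [hrowlen1 _ hN1]; omega⟩,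
            if_pos (Or.inl ⟨hb, hx⟩)]
      · rw [if_neg (fun h => hx ⟨h.1, h.2.1⟩), hcell1]
        by_cases hy : a0 < n ∧ j = a0.toNat ∧ k = 0
        · rw [if_pos hy, if_pos (Or.inr hy)]
        · rw [if_neg hy, if_neg (fun h => h.elim (fun h1 => hx ⟨h1.2.1, h1.2.2⟩) hy)]
    · rw [if_neg hb, hcell1]
      by_cases hy : a0 < n ∧ j = a0.toNat ∧ k = 0
      · rw [if_pos hy, if_pos (Or.inr hy)]
      · rw [if_neg hy, if_neg (fun h => h.elim (fun h1 => hb h1.1) hy)]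
  have hcol : ∀ k, k < M → pvColMin r2 N n k =
      (if b0 < m ∧ k = b0.toNat then 0 else if a0 < n ∧ k = 0 then a0 else n) := by
    intro k hk
    unfold pvColMin
    by_cases hc1 : b0 < m ∧ k = b0.toNat
    · have hN1 : 0 < N := by have := hg2 hc1.1; omega
      rw [pvFf_eq N _ 0 (by omega)
          (fun _ => by rw [hcell]; exact if_pos (Or.inl ⟨hc1.1, rfl, hc1.2⟩))
          (fun i hi => by omega)]
      rw [if_pos hc1]
      unfold pvSent
      rw [if_pos hN1]; rfl
    · by_cases hc2 : a0 < n ∧ k = 0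
      · have haN : a0.toNat < N := by omega
        rw [pvFf_eq N _ a0.toNat (by omega)
            (fun _ => by rw [hcell]; exact if_pos (Or.inr ⟨hc2.1, rfl, hc2.2⟩))
            (fun i hi => by
              rw [hcell]
              refine if_neg (fun h => ?_)
              rcases h with h | h
              · exact hc1 ⟨h.1, by omega⟩
              · omega)]
        rw [if_neg hc1, if_pos hc2]
        unfold pvSent
        rw [if_pos haN]; omega
      · rw [pvFf_eq N _ N le_rfl (fun h => absurd h (lt_irrefl N))
            (fun i hi => by
              rw [hcell]
              refine if_neg (fun h => ?_)
              rcases h with h | h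
              · exact hc1 ⟨h.1, h.2.2⟩
              · exact hc2 ⟨h.1, h.2.2⟩)]
        rw [if_neg hc1, if_neg hc2]
        unfold pvSent
        rw [if_neg (lt_irrefl N)]
  -- now compare the two lists entrywise
  have hF1len : (if a0 < n then (List.replicate M n).set 0 a0 else List.replicate M n).length = M := by
    split_ifs <;> simp
  have hF1 : ∀ jj, jj < M →
      (if a0 < n then (List.replicate M n).set 0 a0 else List.replicate M n).getD jj 0 =
        (if a0 < n ∧ jj = 0 then a0 else n) := by
    intro jj hjj
    by_cases ha : a0 < n
    · rw [if_pos ha, List.getD_eq_getElem?_getD, List.getElem?_set]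
      by_cases hz : jj = 0
      · subst hz
        rw [if_pos rfl, if_pos (by simp; omega), if_pos ⟨ha, rfl⟩]
        rfl
      · rw [if_neg (fun h => hz h.symm), if_neg (fun h => hz h.2),
            List.getElem?_replicate, if_pos hjj]
        rfl
    · rw [if_neg ha, if_neg (fun h => ha h.1), List.getD_eq_getElem?_getD,
          List.getElem?_replicate, if_pos hjj]
      rfl
  set F1 := if a0 < n then (List.replicate M n).set 0 a0 else List.replicate M n with hF1def
  apply List.ext_getElem
  · split_ifs <;> simp [hF1def] <;> split_ifs <;> simp
  · intro i h1 h2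
    have hiM : i < M := by simpa using h2
    have hrhs : ((List.range M).map (pvColMin r2 N n))[i]'h2 = pvColMin r2 N n i := by
      simp
    rw [hrhs, hcol i hiM, ← List.getD_eq_getElem _ 0 h1]
    by_cases hb : b0 < m
    · rw [if_pos hb, List.getD_eq_getElem?_getD, List.getElem?_set]
      have hbM : b0.toNat < M := by omega
      by_cases hbi : b0.toNat = i
      · rw [if_pos hbi]
        rw [if_pos (show b0.toNat < F1.length by rw [hF1len]; omega)]
        rw [Option.getD_some]
        rw [if_pos (show b0 < m ∧ i = b0.toNat from ⟨hb, hbi.symm⟩)]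
        rw [hF1 b0.toNat hbM]
        have hn1 : (1:Int) ≤ n := hg2 hb
        split_ifs <;> omega
      · rw [if_neg hbi, if_neg (fun h : b0 < m ∧ i = b0.toNat => hbi h.2.symm)]
        rw [← List.getD_eq_getElem?_getD, hF1 i hiM]
    · rw [if_neg hb, if_neg (fun h : b0 < m ∧ i = b0.toNat => hb h.1), hF1 i hiM]

theorem pvFoldlNil (rs : List (List Int)) :
    List.foldl (fun (_ : List Int) (_ : List Int) => ([] : List Int)) [] rs = [] := by
  induction rs with
  | nil => rfl
  | cons r t ih => simpa using ih

theorem pvScan_eq (N : Nat) (p : Nat → Bool) :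
    (match (List.range N).find? p with | some j => ((j : Nat) : Int) | none => -1) =
      if pvFf N p < N then ((pvFf N p : Nat) : Int) else -1 := by
  unfold pvFf
  cases hf : (List.range N).find? p with
  | none => simp
  | some j =>
    have := List.mem_range.mp (List.mem_of_find?_eq_some hf)
    simp [this]

theorem pvRet (n : Int) (T : Nat) :
    (if pvSent n T < n then pvSent n T else -1) = (if T < n.toNat then ((T : Nat) : Int) else -1) := by
  unfold pvSent; split_ifs <;> omega

-- ===== VERDICT (by name: the statement is the Claim_ definition above) =====
theorem solution_spec : Claim_equal_solution := by
  unfold Claim_equal_solution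
  intro info n m hdom hpre
  unfold Spec_solution
  rcases hpre with ⟨hne, hrows, hg1, hg2⟩ | ⟨hne, hlens, hm, hga, hgb⟩
  case inr =>
    -- m ≤ 0: the budget dimension is empty; A's scan and B's fold both yield -1
    have hM : m.toNat = 0 := by omega
    have h1 : ¬ (info.getD 0 []).getD 0 0 < n := by omega
    have h2 : ¬ (info.getD 0 []).getD 1 0 < m := by omega
    simp only [solution, solution_alt, pvGetI, if_neg h1, if_neg h2, hM,
      List.range_zero, List.map_nil, List.any_nil, List.replicate_zero]
    rw [pvFoldlNil, List.find?_eq_none.mpr (fun x _ => by simp)]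
    simp
  simp only [solution, solution_alt, pvGetI]
  have hmem : info.getD 0 [] ∈ info := by
    cases info with
    | nil => exact absurd rfl hne
    | cons h t => simp
  obtain ⟨-, ha0, hb0⟩ := hrows _ hmem
  have hdrop : ∀ r ∈ info.drop 1, 0 ≤ r.getD 0 0 ∧ 0 ≤ r.getD 1 0 := fun r h =>
    ⟨(hrows r (List.mem_of_mem_drop h)).2.1, (hrows r (List.mem_of_mem_drop h)).2.2⟩
  rw [pvScan_eq]
  rw [pvBase n m ((info.getD 0 []).getD 0 0) ((info.getD 0 []).getD 1 0) ha0 hb0 hg1 hg2]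
  rw [pvFold_inv n m (info.drop 1) hdrop]
  rw [pvFinal]
  rw [pvRet]
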